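-- pv_equiv track=rewrite | github.com/Hardcoreprawn/ai-content-farm | containers/content-collector/main_topic_intelligence.py | _classify_topic_categories
-- ===== SOURCE A (Python) =====
-- from typing import Any, Dict, List, Optional, Set
--
-- def _classify_topic_categories(
--     keywords: List[str], target_categories: List[str]
-- ) -> List[str]:
--     """Classify topic into categories based on keywords."""
--     categories = []
--
--     tech_keywords = {
--         "ai",
--         "artificial",
--         "machine",
--         "learning",
--         "programming",
--         "software",
--         "tech",
--         "quantum",
--         "cyber",
--     }
--     science_keywords = {
--         "science",
--         "research",
--         "study",
--         "discovery",
--         "breakthrough",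
--         "innovation",
--     }
--     business_keywords = {
--         "business",
--         "startup",
--         "enterprise",
--         "market",
--         "economy",
--         "finance",
--     }
--
--     keyword_set = set(k.lower() for k in keywords)
--
--     if keyword_set & tech_keywords:
--         categories.append("technology")
--     if keyword_set & science_keywords:
--         categories.append("science")
--     if keyword_set & business_keywords:
--         categories.append("business")
--
--     return categories or ["general"]
-- ===== SOURCE B (Python) =====
-- # Alternative algorithm: one short-circuiting pass keeps three boolean flags
-- # (tech/science/business), stopping early once all three are set; the result
-- # list is then read off a precomputed 8-entry table indexed by the flag bits.
--
-- _TECH = ("ai", "artificial", "machine", "learning", "programming",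
--          "software", "tech", "quantum", "cyber")
-- _SCI = ("science", "research", "study", "discovery", "breakthrough",
--         "innovation")
-- _BUS = ("business", "startup", "enterprise", "market", "economy", "finance")
--
-- # index bits: 4 = technology, 2 = science, 1 = business
-- _TABLE = [
--     ["general"],
--     ["business"],
--     ["science"],
--     ["science", "business"],
--     ["technology"],
--     ["technology", "business"],
--     ["technology", "science"],
--     ["technology", "science", "business"],
-- ]
--
--
-- def _classify_topic_categories(keywords, target_categories):
--     t = s = b = False
--     for k in keywords:
--         w = k.lower()
--         t = t or w in _TECH
--         s = s or w in _SCI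
--         b = b or w in _BUS
--         if t and s and b:
--             break
--     return list(_TABLE[(4 if t else 0) | (2 if s else 0) | (1 if b else 0)])
-- ===== Notes on version B (the rewrite author's own statement) =====
-- stated objective: alternative
-- what changed: Replaces the lowered-keyword set and three set-with-set intersections plus conditional appends by a single short-circuiting pass that accumulates three boolean flags (breaking once all are set) and then reads the answer off a precomputed 8-entry table indexed by the flag bits.
import Mathlib
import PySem

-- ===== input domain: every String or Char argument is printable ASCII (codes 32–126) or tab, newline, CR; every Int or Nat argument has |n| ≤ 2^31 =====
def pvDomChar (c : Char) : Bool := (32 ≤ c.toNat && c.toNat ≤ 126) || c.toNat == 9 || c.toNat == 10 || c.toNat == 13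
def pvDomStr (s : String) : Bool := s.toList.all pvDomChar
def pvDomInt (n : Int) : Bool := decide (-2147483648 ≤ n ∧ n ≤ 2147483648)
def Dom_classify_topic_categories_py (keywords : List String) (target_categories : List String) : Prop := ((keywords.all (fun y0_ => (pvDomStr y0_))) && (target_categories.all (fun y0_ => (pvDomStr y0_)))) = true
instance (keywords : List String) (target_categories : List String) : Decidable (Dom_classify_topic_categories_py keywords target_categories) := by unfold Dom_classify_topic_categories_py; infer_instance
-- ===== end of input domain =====

-- B replaces the set intersections and conditional appends by one short-circuiting
-- flag-accumulating pass plus an 8-entry output table indexed by the flag bits.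

-- ===== PORT A =====
def classify_topic_categories_py (keywords : List String) (target_categories : List String) : List String :=
  let tech_keywords : PySem.Set String := PySem.Set.ofList
    ["ai", "artificial", "machine", "learning", "programming", "software", "tech", "quantum", "cyber"]
  let science_keywords : PySem.Set String := PySem.Set.ofList
    ["science", "research", "study", "discovery", "breakthrough", "innovation"]
  let business_keywords : PySem.Set String := PySem.Set.ofList
    ["business", "startup", "enterprise", "market", "economy", "finance"]
  let keyword_set : PySem.Set String := PySem.Set.ofList (keywords.map (fun k => PySem.Str.lower k))
  let categories : List String := []
  let categories := if PySem.Set.inter keyword_set tech_keywords ≠ [] then categories ++ ["technology"] else categories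
  let categories := if PySem.Set.inter keyword_set science_keywords ≠ [] then categories ++ ["science"] else categories
  let categories := if PySem.Set.inter keyword_set business_keywords ≠ [] then categories ++ ["business"] else categories
  if categories = [] then ["general"] else categories

-- ===== PORT B =====
def pvTechWords : List String :=
  ["ai", "artificial", "machine", "learning", "programming", "software", "tech", "quantum", "cyber"]
def pvSciWords : List String :=
  ["science", "research", "study", "discovery", "breakthrough", "innovation"]
def pvBusWords : List String :=
  ["business", "startup", "enterprise", "market", "economy", "finance"]

-- index bits: 4 = technology, 2 = science, 1 = business
def pvTable : List (List String) :=
  [["general"], ["business"], ["science"], ["science", "business"],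
   ["technology"], ["technology", "business"], ["technology", "science"],
   ["technology", "science", "business"]]

-- the for-loop with its early break, as structural recursion over the keywords
def pvClassifyLoop : List String → Bool → Bool → Bool → Bool × Bool × Bool
  | [], t, s, b => (t, s, b)
  | k :: ks, t, s, b =>
    let w := PySem.Str.lower k
    let t := t || pvTechWords.contains w
    let s := s || pvSciWords.contains w
    let b := b || pvBusWords.contains w
    if t && s && b then (t, s, b) else pvClassifyLoop ks t s b

def classify_topic_categories_py_alt (keywords : List String) (target_categories : List String) : List String :=
  let r := pvClassifyLoop keywords false false false
  pvTable.getD (((if r.1 then 4 else 0) ||| (if r.2.1 then 2 else 0)) ||| (if r.2.2 then 1 else 0)) []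

-- ===== PRECONDITION & SPEC =====
def Spec_classify_topic_categories_py (keywords : List String) (target_categories : List String) (out : List String) : Prop := out = classify_topic_categories_py_alt keywords target_categories
instance (keywords : List String) (target_categories : List String) (out : List String) : Decidable (Spec_classify_topic_categories_py keywords target_categories out) := by unfold Spec_classify_topic_categories_py; infer_instance

-- ===== CLAIM (what is proved, stated in full; the proofs are below) =====
def Claim_equal_classify_topic_categories_py : Prop := ∀ (keywords : List String) (target_categories : List String), Dom_classify_topic_categories_py keywords target_categories → Spec_classify_topic_categories_py keywords target_categories (classify_topic_categories_py keywords target_categories)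

-- ===== LEMMAS AND PROOFS =====

theorem pvOrAbsorb (x y r : Bool) (h : (x || y) = true) : (x || y) = (x || (y || r)) := by
  cases x <;> cases y <;> simp_all

-- The early break cannot change the result: once all flags are true further keywords are inert.
theorem pvClassifyLoop_eq (l : List String) (t s b : Bool) :
    pvClassifyLoop l t s b =
      (t || l.any (fun k => pvTechWords.contains (PySem.Str.lower k)),
       s || l.any (fun k => pvSciWords.contains (PySem.Str.lower k)),
       b || l.any (fun k => pvBusWords.contains (PySem.Str.lower k))) := by
  induction l generalizing t s b with
  | nil => simp [pvClassifyLoop]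
  | cons k ks ih =>
    simp only [pvClassifyLoop, List.any_cons]
    split
    · rename_i h
      simp only [Bool.and_eq_true] at h
      obtain ⟨⟨ht, hs⟩, hb⟩ := h
      simp only [Prod.mk.injEq]
      exact ⟨pvOrAbsorb _ _ _ ht, pvOrAbsorb _ _ _ hs, pvOrAbsorb _ _ _ hb⟩
    · rw [ih]; simp [Bool.or_assoc]

-- A's truthiness test 'set(f(x) for x in l) & t' is "some element of l maps into t".
theorem inter_ofList_map_ne_nil_iff (l : List String) (f : String → String) (t : List String) :
    PySem.Set.inter (PySem.Set.ofList (l.map f)) t ≠ [] ↔ ∃ k ∈ l, f k ∈ t := by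
  rw [Ne, List.eq_nil_iff_forall_not_mem]
  constructor
  · intro h
    by_contra hc
    apply h
    intro x hx
    rw [PySem.Set.mem_inter, PySem.Set.mem_ofList, List.mem_map] at hx
    obtain ⟨⟨k, hk, rfl⟩, hxt⟩ := hx
    exact hc ⟨k, hk, hxt⟩
  · rintro ⟨k, hk, hkt⟩ h
    exact h (f k) (by rw [PySem.Set.mem_inter, PySem.Set.mem_ofList, List.mem_map]
                      exact ⟨⟨k, hk, rfl⟩, hkt⟩)

-- A's condition matched with B's per-keyword any-test over the same word list.
theorem inter_cond (l ws : List String) :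
    (PySem.Set.inter (PySem.Set.ofList (l.map (fun k => PySem.Str.lower k))) (PySem.Set.ofList ws) ≠ []) ↔
      (l.any fun k => ws.contains (PySem.Str.lower k)) = true := by
  rw [inter_ofList_map_ne_nil_iff]
  simp [List.any_eq_true, PySem.Set.mem_ofList, List.contains_iff_mem]

-- ===== VERDICT (by name: the statement is the Claim_ definition above) =====
theorem classify_topic_categories_py_spec : Claim_equal_classify_topic_categories_py := by
  intro keywords target_categories _
  unfold Spec_classify_topic_categories_py classify_topic_categories_py classify_topic_categories_py_alt
  simp only [pvClassifyLoop_eq, Bool.false_or, pvTechWords, pvSciWords, pvBusWords, inter_cond]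
  rcases hT : keywords.any (fun k => (["ai", "artificial", "machine", "learning", "programming", "software", "tech", "quantum", "cyber"] : List String).contains (PySem.Str.lower k)) <;>
  rcases hS : keywords.any (fun k => (["science", "research", "study", "discovery", "breakthrough", "innovation"] : List String).contains (PySem.Str.lower k)) <;>
  rcases hB : keywords.any (fun k => (["business", "startup", "enterprise", "market", "economy", "finance"] : List String).contains (PySem.Str.lower k)) <;>
    simp [hT, hS, hB, pvTable, List.getD]
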